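-- pv_equiv track=rewrite | github.com/Hemantcods/DSA | LeeetCode/Day40/2573. Find the String with LCP.py | checkLCP
-- ===== SOURCE A (Python) =====
-- def checkLCP(string,lcp):
--     n=len(lcp)
--     nlcp = [[0]*n for _ in range(n)]
--     for i in range(n):
--         nlcp[i][n-1]=1 if string[i]==string[n-1] else 0
--     for i in range(n):
--         nlcp[n-1][i]=1 if string[n-1]==string[i] else 0
--     for i in range(n-2,-1,-1):
--         for j in range(n-2,-1,-1):
--             if string[i]==string[j]:
--                 nlcp[i][j]=1+nlcp[i+1][j+1]
--             else:
--                 nlcp[i][j]=0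
--     return nlcp==lcp
-- ===== SOURCE B (Python) =====
-- def checkLCP(string, lcp):
--     n = len(lcp)
--     matrix = []
--     for i in range(n):
--         row = []
--         for j in range(n):
--             k = 0
--             while i + k < n and j + k < n and string[i + k] == string[j + k]:
--                 k += 1
--             row.append(k)
--         matrix.append(row)
--     return matrix == lcp
-- ===== Notes on version B (the rewrite author's own statement) =====
-- stated objective: simpler
-- what changed: Replaces A's backward dynamic-programming recurrence (two base-case passes plus a reversed double loop mutating a preallocated matrix) by a direct per-entry forward scan: each LCP entry (i,j) is computed independently by counting consecutive equal characters string[i+k]==string[j+k] within range(n).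
import Mathlib
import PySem

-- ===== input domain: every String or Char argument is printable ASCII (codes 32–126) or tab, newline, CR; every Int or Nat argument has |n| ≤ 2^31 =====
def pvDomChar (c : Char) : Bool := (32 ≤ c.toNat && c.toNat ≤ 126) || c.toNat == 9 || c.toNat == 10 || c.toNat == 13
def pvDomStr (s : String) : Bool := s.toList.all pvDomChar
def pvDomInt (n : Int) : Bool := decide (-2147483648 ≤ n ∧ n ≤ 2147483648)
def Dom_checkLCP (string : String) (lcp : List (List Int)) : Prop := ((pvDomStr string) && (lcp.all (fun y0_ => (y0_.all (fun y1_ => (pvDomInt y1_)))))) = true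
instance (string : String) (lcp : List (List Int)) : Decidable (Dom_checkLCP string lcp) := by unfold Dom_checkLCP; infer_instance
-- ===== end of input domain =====

-- B replaces A's backward DP over a mutated matrix by an independent forward scan per entry (same result; not faster).
-- ===== PORT A =====
-- string[i] for the 0 ≤ i < len(string) indices both programs use inside Pre_ (out of range = IndexError, excluded by Pre_; the default is never reached there)
def pvChar (s : List Char) (i : Int) : Char := (PySem.List.pyGet? s i).getD ' '
-- nlcp[i][j] read (indices always in range in both programs)
def pvEnt (m : List (List Int)) (i j : Nat) : Int := (m.getD i []).getD j 0
-- nlcp[i][j] = v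
def pvSet2 (m : List (List Int)) (i j : Nat) (v : Int) : List (List Int) :=
  m.set i ((m.getD i []).set j v)
-- body of A's first loop: nlcp[i][n-1] = 1 if string[i]==string[n-1] else 0
def pvBody1 (s : List Char) (n : Nat) (m : List (List Int)) (i : Int) : List (List Int) :=
  pvSet2 m i.toNat (n-1) (if pvChar s i = pvChar s ((n:Int)-1) then 1 else 0)
-- body of A's second loop: nlcp[n-1][i] = 1 if string[n-1]==string[i] else 0
def pvBody2 (s : List Char) (n : Nat) (m : List (List Int)) (i : Int) : List (List Int) :=
  pvSet2 m (n-1) i.toNat (if pvChar s ((n:Int)-1) = pvChar s i then 1 else 0)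
-- body of A's inner loop (the if/else assigning nlcp[i][j])
def pvCell (s : List Char) (i : Int) (m : List (List Int)) (j : Int) : List (List Int) :=
  if pvChar s i = pvChar s j then pvSet2 m i.toNat j.toNat (1 + pvEnt m (i.toNat+1) (j.toNat+1))
  else pvSet2 m i.toNat j.toNat 0
-- one iteration of A's outer loop: for j in range(n-2,-1,-1)
def pvRow (s : List Char) (n : Nat) (m : List (List Int)) (i : Int) : List (List Int) :=
  (PySem.List.pyRange ((n:Int)-2) (-1) (-1)).foldl (pvCell s i) m

def checkLCP (string : String) (lcp : List (List Int)) : Bool :=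
  let s := string.toList
  let n := lcp.length
  let m0 := List.replicate n (List.replicate n (0:Int))
  let m1 := (PySem.List.pyRange 0 (n:Int) 1).foldl (pvBody1 s n) m0
  let m2 := (PySem.List.pyRange 0 (n:Int) 1).foldl (pvBody2 s n) m1
  let m3 := (PySem.List.pyRange ((n:Int)-2) (-1) (-1)).foldl (pvRow s n) m2
  m3 == lcp

-- ===== PORT B =====
-- Source B's while loop: count k while i+k<n and j+k<n and string[i+k]==string[j+k] (fuel n+1 always suffices: i increases each step and the loop stops at i ≥ n)
def pvCount (s : List Char) (n : Nat) : Nat → Nat → Nat → Int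
  | 0, _, _ => 0
  | f+1, i, j =>
    if i < n ∧ j < n ∧ pvChar s (i:Int) = pvChar s (j:Int) then 1 + pvCount s n f (i+1) (j+1)
    else 0

def checkLCP_alt (string : String) (lcp : List (List Int)) : Bool :=
  let s := string.toList
  let n := lcp.length
  let matrix := (List.range n).map (fun i => (List.range n).map (fun j => pvCount s n (n+1) i j))
  matrix == lcp

-- ===== PRECONDITION & SPEC =====
-- Pre_ excludes exactly the inputs where A raises IndexError (len(string) < len(lcp)); B raises there too.
def Pre_checkLCP (string : String) (lcp : List (List Int)) : Prop :=
  lcp.length ≤ string.toList.length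
instance (string : String) (lcp : List (List Int)) : Decidable (Pre_checkLCP string lcp) := by
  unfold Pre_checkLCP; infer_instance
def pvWitness_checkLCP : String × List (List Int) := ("ab", [[2,0],[0,1]])

def Spec_checkLCP (string : String) (lcp : List (List Int)) (out : Bool) : Prop := out = checkLCP_alt string lcp
instance (string : String) (lcp : List (List Int)) (out : Bool) : Decidable (Spec_checkLCP string lcp out) := by unfold Spec_checkLCP; infer_instance

-- ===== CLAIM (what is proved, stated in full; the proofs are below) =====
def Claim_equal_checkLCP : Prop := ∀ (string : String) (lcp : List (List Int)), Dom_checkLCP string lcp → Pre_checkLCP string lcp → Spec_checkLCP string lcp (checkLCP string lcp)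

-- ===== LEMMAS AND PROOFS =====

-- n×n shape invariant of A's matrix
def pvShape (m : List (List Int)) (n : Nat) : Prop :=
  m.length = n ∧ ∀ r ∈ m, r.length = n

lemma pvCount_succ (s : List Char) (n f i j : Nat) :
    pvCount s n (f+1) i j =
      if i < n ∧ j < n ∧ pvChar s (i:Int) = pvChar s (j:Int)
      then 1 + pvCount s n f (i+1) (j+1) else 0 := rfl

lemma pvCount_fuel (s : List Char) (n : Nat) :
    ∀ f₁ f₂ i j, n ≤ f₁ + i → n ≤ f₂ + i → pvCount s n f₁ i j = pvCount s n f₂ i j := by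
  intro f₁
  induction f₁ with
  | zero =>
    intro f₂ i j h1 h2
    cases f₂ with
    | zero => rfl
    | succ g =>
      have hi : ¬ i < n := by omega
      rw [pvCount_succ, if_neg (by rintro ⟨h, -, -⟩; exact hi h)]
      rfl
  | succ e ih =>
    intro f₂ i j h1 h2
    cases f₂ with
    | zero =>
      have hi : ¬ i < n := by omega
      rw [pvCount_succ, if_neg (by rintro ⟨h, -, -⟩; exact hi h)]
      rfl
    | succ g =>
      rw [pvCount_succ, pvCount_succ]
      by_cases h : i < n ∧ j < n ∧ pvChar s (i:Int) = pvChar s (j:Int)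
      · rw [if_pos h, if_pos h, ih g (i+1) (j+1) (by omega) (by omega)]
      · rw [if_neg h, if_neg h]

-- the defining recurrence of B's count at full fuel
lemma pvC_rec (s : List Char) (n i j : Nat) :
    pvCount s n (n+1) i j =
      if i < n ∧ j < n ∧ pvChar s (i:Int) = pvChar s (j:Int)
      then 1 + pvCount s n (n+1) (i+1) (j+1) else 0 := by
  rw [pvCount_succ]
  by_cases h : i < n ∧ j < n ∧ pvChar s (i:Int) = pvChar s (j:Int)
  · rw [if_pos h, if_pos h, pvCount_fuel s n n (n+1) (i+1) (j+1) (by omega) (by omega)]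
  · rw [if_neg h, if_neg h]

lemma pvC_base_col (s : List Char) (n i : Nat) (hi : i < n) :
    pvCount s n (n+1) i (n-1) =
      if pvChar s (i:Int) = pvChar s ((n:Int)-1) then 1 else 0 := by
  have hcast : (((n-1 : Nat)):Int) = (n:Int)-1 := by omega
  rw [pvC_rec]
  by_cases h : pvChar s (i:Int) = pvChar s ((n:Int)-1)
  · rw [if_pos (⟨hi, by omega, by rw [hcast]; exact h⟩ :
        i < n ∧ n-1 < n ∧ pvChar s (i:Int) = pvChar s (((n-1:Nat)):Int)), if_pos h]
    rw [pvC_rec s n (i+1) (n-1+1),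
        if_neg (by rintro ⟨-, h2, -⟩; omega :
          ¬ ((i+1) < n ∧ (n-1+1) < n ∧ pvChar s ((i+1:Nat):Int) = pvChar s ((n-1+1:Nat):Int)))]
    norm_num
  · rw [if_neg (by rintro ⟨-, -, h2⟩; rw [hcast] at h2; exact h h2), if_neg h]

lemma pvC_base_row (s : List Char) (n j : Nat) (hj : j < n) :
    pvCount s n (n+1) (n-1) j =
      if pvChar s ((n:Int)-1) = pvChar s (j:Int) then 1 else 0 := by
  have hcast : (((n-1 : Nat)):Int) = (n:Int)-1 := by omega
  rw [pvC_rec]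
  by_cases h : pvChar s ((n:Int)-1) = pvChar s (j:Int)
  · rw [if_pos (⟨by omega, hj, by rw [hcast]; exact h⟩ :
        n-1 < n ∧ j < n ∧ pvChar s (((n-1:Nat)):Int) = pvChar s (j:Int)), if_pos h]
    rw [pvC_rec s n (n-1+1) (j+1),
        if_neg (by rintro ⟨h2, -, -⟩; omega :
          ¬ ((n-1+1) < n ∧ (j+1) < n ∧ pvChar s ((n-1+1:Nat):Int) = pvChar s ((j+1:Nat):Int)))]
    norm_num
  · rw [if_neg (by rintro ⟨-, -, h2⟩; rw [hcast] at h2; exact h h2), if_neg h]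

lemma pvEnt_set2_ne (m : List (List Int)) (i j i' j' : Nat) (v : Int)
    (h : i' ≠ i ∨ j' ≠ j) : pvEnt (pvSet2 m i j v) i' j' = pvEnt m i' j' := by
  simp only [pvEnt, pvSet2, List.getD_eq_getElem?_getD]
  by_cases hi : i' = i
  · subst hi
    have hj : j' ≠ j := h.resolve_left (by simp)
    by_cases hlen : i' < m.length
    · rw [List.getElem?_set_self hlen, Option.getD_some,
          List.getElem?_set_ne (Ne.symm hj)]
    · rw [List.set_eq_of_length_le (by omega)]
  · rw [List.getElem?_set_ne (Ne.symm hi)]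

lemma pvEnt_set2_eq (m : List (List Int)) (n i j : Nat) (v : Int)
    (hs : pvShape m n) (hi : i < n) (_hj : j < n) :
    pvEnt (pvSet2 m i j v) i j = v := by
  obtain ⟨hlen, hrow⟩ := hs
  have hi' : i < m.length := by omega
  simp only [pvEnt, pvSet2, List.getD_eq_getElem?_getD]
  rw [List.getElem?_eq_getElem hi', Option.getD_some,
      List.getElem?_set_self hi', Option.getD_some,
      List.getElem?_set_self (by rw [hrow _ (List.getElem_mem hi')]; omega),
      Option.getD_some]

lemma pvShape_set2 (m : List (List Int)) (n i j : Nat) (v : Int)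
    (hs : pvShape m n) (hi : i < n) (_hj : j < n) : pvShape (pvSet2 m i j v) n := by
  obtain ⟨hlen, hrow⟩ := hs
  constructor
  · simp [pvSet2, hlen]
  · intro r hr
    rcases List.mem_or_eq_of_mem_set hr with hr' | rfl
    · exact hrow _ hr'
    · have hi' : i < m.length := by omega
      rw [List.length_set, List.getD_eq_getElem?_getD, List.getElem?_eq_getElem hi',
          Option.getD_some]
      exact hrow _ (List.getElem_mem hi')

lemma pvLoop1 (s : List Char) (n : Nat) :
    ∀ (L : List Int) (m : List (List Int)),
      (∀ x ∈ L, 0 ≤ x ∧ x < (n:Int)) → pvShape m n →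
      pvShape (L.foldl (pvBody1 s n) m) n ∧
      ∀ i' j', i' < n → j' < n →
        pvEnt (L.foldl (pvBody1 s n) m) i' j' =
          if (i' : Int) ∈ L ∧ j' = n-1
          then (if pvChar s (i':Int) = pvChar s ((n:Int)-1) then 1 else 0)
          else pvEnt m i' j' := by
  intro L
  induction L with
  | nil => intro m _ hs; exact ⟨hs, by simp⟩
  | cons x T ih =>
    intro m hL hs
    have hx := hL x (by simp)
    have hn1 : n - 1 < n := by omega
    have hxn : x.toNat < n := by omega
    set m1 := pvBody1 s n m x with hm1
    have hs1 : pvShape m1 n := pvShape_set2 _ _ _ _ _ hs hxn hn1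
    obtain ⟨hsh, hent⟩ := ih m1 (fun y hy => hL y (by simp [hy])) hs1
    refine ⟨hsh, ?_⟩
    intro i' j' hi' hj'
    simp only [List.foldl_cons]
    rw [hent i' j' hi' hj']
    by_cases hT : (i' : Int) ∈ T ∧ j' = n-1
    · have hcons : (i':Int) ∈ x :: T ∧ j' = n-1 := ⟨List.mem_cons_of_mem _ hT.1, hT.2⟩
      rw [if_pos hT, if_pos hcons]
    · rw [if_neg hT]
      by_cases hhd : (i' : Int) = x ∧ j' = n-1
      · obtain ⟨hix, hjn⟩ := hhd
        have hcons : (i':Int) ∈ x :: T ∧ j' = n-1 := ⟨by simp [hix], hjn⟩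
        rw [if_pos hcons, hm1]
        unfold pvBody1
        subst hjn
        have hx' : x.toNat = i' := by omega
        rw [hx', ← hix]
        exact pvEnt_set2_eq _ n _ _ _ hs hi' hn1
      · have hne : ¬ ((i' : Int) ∈ x :: T ∧ j' = n-1) := by
          rintro ⟨hm2, hj2⟩
          rcases List.mem_cons.mp hm2 with h | h
          · exact hhd ⟨h, hj2⟩
          · exact hT ⟨h, hj2⟩
        rw [if_neg hne, hm1]
        unfold pvBody1
        apply pvEnt_set2_ne
        by_cases hij : i' = x.toNat
        · right; intro hj2; exact hhd ⟨by omega, hj2⟩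
        · left; exact hij

lemma pvLoop2 (s : List Char) (n : Nat) :
    ∀ (L : List Int) (m : List (List Int)),
      (∀ x ∈ L, 0 ≤ x ∧ x < (n:Int)) → pvShape m n →
      pvShape (L.foldl (pvBody2 s n) m) n ∧
      ∀ i' j', i' < n → j' < n →
        pvEnt (L.foldl (pvBody2 s n) m) i' j' =
          if i' = n-1 ∧ (j' : Int) ∈ L
          then (if pvChar s ((n:Int)-1) = pvChar s (j':Int) then 1 else 0)
          else pvEnt m i' j' := by
  intro L
  induction L with
  | nil => intro m _ hs; exact ⟨hs, by simp⟩
  | cons x T ih =>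
    intro m hL hs
    have hx := hL x (by simp)
    have hn1 : n - 1 < n := by omega
    have hxn : x.toNat < n := by omega
    set m1 := pvBody2 s n m x with hm1
    have hs1 : pvShape m1 n := pvShape_set2 _ _ _ _ _ hs hn1 hxn
    obtain ⟨hsh, hent⟩ := ih m1 (fun y hy => hL y (by simp [hy])) hs1
    refine ⟨hsh, ?_⟩
    intro i' j' hi' hj'
    simp only [List.foldl_cons]
    rw [hent i' j' hi' hj']
    by_cases hT : i' = n-1 ∧ (j' : Int) ∈ T
    · have hcons : i' = n-1 ∧ (j':Int) ∈ x :: T := ⟨hT.1, List.mem_cons_of_mem _ hT.2⟩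
      rw [if_pos hT, if_pos hcons]
    · rw [if_neg hT]
      by_cases hhd : i' = n-1 ∧ (j' : Int) = x
      · obtain ⟨hin, hjx⟩ := hhd
        have hcons : i' = n-1 ∧ (j':Int) ∈ x :: T := ⟨hin, by simp [hjx]⟩
        rw [if_pos hcons, hm1]
        unfold pvBody2
        subst hin
        have hx' : x.toNat = j' := by omega
        rw [hx', ← hjx]
        exact pvEnt_set2_eq _ n _ _ _ hs hn1 hj'
      · have hne : ¬ (i' = n-1 ∧ (j' : Int) ∈ x :: T) := by
          rintro ⟨hi2, hm2⟩
          rcases List.mem_cons.mp hm2 with h | h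
          · exact hhd ⟨hi2, h⟩
          · exact hT ⟨hi2, h⟩
        rw [if_neg hne, hm1]
        unfold pvBody2
        apply pvEnt_set2_ne
        by_cases hij : j' = x.toNat
        · left; intro hi2; exact hhd ⟨hi2, by omega⟩
        · right; exact hij

lemma pvCell_eq_set2 (s : List Char) (i : Int) (m : List (List Int)) (j : Int) :
    pvCell s i m j = pvSet2 m i.toNat j.toNat
      (if pvChar s i = pvChar s j then 1 + pvEnt m (i.toNat+1) (j.toNat+1) else 0) := by
  unfold pvCell
  by_cases h : pvChar s i = pvChar s j <;> simp [h]

lemma pvCellFold (s : List Char) (n : Nat) (i₀ : Nat) (hi₀ : i₀ < n) :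
    ∀ (K : List Int) (m : List (List Int)),
      (∀ x ∈ K, 0 ≤ x ∧ x < (n:Int)) → pvShape m n →
      pvShape (K.foldl (pvCell s (i₀:Int)) m) n ∧
      ∀ i' j', i' < n → j' < n →
        pvEnt (K.foldl (pvCell s (i₀:Int)) m) i' j' =
          if i' = i₀ ∧ (j' : Int) ∈ K
          then (if pvChar s (i₀:Int) = pvChar s (j':Int) then 1 + pvEnt m (i₀+1) (j'+1) else 0)
          else pvEnt m i' j' := by
  intro K
  induction K with
  | nil => intro m _ hs; exact ⟨hs, by simp⟩
  | cons x T ih =>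
    intro m hK hs
    have hx := hK x (by simp)
    have hxn : x.toNat < n := by omega
    set m1 := pvCell s (i₀:Int) m x with hm1
    have hm1set : m1 = pvSet2 m i₀ x.toNat
        (if pvChar s (i₀:Int) = pvChar s x then 1 + pvEnt m (i₀+1) (x.toNat+1) else 0) := by
      rw [hm1, pvCell_eq_set2]; simp
    have hs1 : pvShape m1 n := by rw [hm1set]; exact pvShape_set2 _ _ _ _ _ hs hi₀ hxn
    obtain ⟨hsh, hent⟩ := ih m1 (fun y hy => hK y (by simp [hy])) hs1
    refine ⟨hsh, ?_⟩
    intro i' j' hi' hj'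
    simp only [List.foldl_cons]
    rw [hent i' j' hi' hj']
    have hrowup : ∀ k, pvEnt m1 (i₀+1) k = pvEnt m (i₀+1) k := by
      intro k
      rw [hm1set]
      exact pvEnt_set2_ne _ _ _ _ _ _ (Or.inl (by omega))
    by_cases hT : i' = i₀ ∧ (j' : Int) ∈ T
    · have hcons : i' = i₀ ∧ (j':Int) ∈ x :: T := ⟨hT.1, List.mem_cons_of_mem _ hT.2⟩
      rw [if_pos hT, if_pos hcons, hrowup]
    · rw [if_neg hT]
      by_cases hhd : i' = i₀ ∧ (j' : Int) = x
      · obtain ⟨hii, hjx⟩ := hhd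
        have hcons : i' = i₀ ∧ (j':Int) ∈ x :: T := ⟨hii, by simp [hjx]⟩
        rw [if_pos hcons, hm1set]
        subst hii
        have hx' : x.toNat = j' := by omega
        rw [hx', ← hjx]
        exact pvEnt_set2_eq _ n _ _ _ hs hi' hj'
      · have hne : ¬ (i' = i₀ ∧ (j' : Int) ∈ x :: T) := by
          rintro ⟨hi2, hm2⟩
          rcases List.mem_cons.mp hm2 with h | h
          · exact hhd ⟨hi2, h⟩
          · exact hT ⟨hi2, h⟩
        rw [if_neg hne, hm1set]
        apply pvEnt_set2_ne
        by_cases hij : i' = i₀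
        · right; intro hj2; exact hhd ⟨hij, by omega⟩
        · left; exact hij

-- processing one outer row i₀ turns row i₀ (cols ≤ n-2) into C-values, given row i₀+1 correct
lemma pvRowStep (s : List Char) (n : Nat) (i₀ : Nat) (hi₀2 : i₀ + 2 ≤ n)
    (m : List (List Int)) (hs : pvShape m n)
    (hyp : ∀ i j, i < n → j < n → ((i₀:Int) < i ∨ j = n-1) → pvEnt m i j = pvCount s n (n+1) i j) :
    pvShape (pvRow s n m (i₀:Int)) n ∧
    ∀ i j, i < n → j < n → ((i₀:Int) ≤ i ∨ j = n-1) → pvEnt (pvRow s n m (i₀:Int)) i j = pvCount s n (n+1) i j := by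
  have hi₀ : i₀ < n := by omega
  have hmem : ∀ x ∈ PySem.List.pyRange ((n:Int)-2) (-1) (-1), 0 ≤ x ∧ x < (n:Int) := by
    intro x hx
    rw [PySem.List.mem_pyRange_neg_one] at hx
    omega
  obtain ⟨hsh, hent⟩ := pvCellFold s n i₀ hi₀ (PySem.List.pyRange ((n:Int)-2) (-1) (-1)) m hmem hs
  refine ⟨hsh, ?_⟩
  intro i j hi hj hcond
  unfold pvRow
  rw [hent i j hi hj]
  by_cases hin : i = i₀ ∧ (j : Int) ∈ PySem.List.pyRange ((n:Int)-2) (-1) (-1)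
  · rw [if_pos hin]
    have hjlt : j < n - 1 := by
      have := hin.2
      rw [PySem.List.mem_pyRange_neg_one] at this
      omega
    have hrec := pvC_rec s n i₀ j
    have hup : pvEnt m (i₀+1) (j+1) = pvCount s n (n+1) (i₀+1) (j+1) :=
      hyp (i₀+1) (j+1) (by omega) (by omega) (Or.inl (by omega))
    rw [hin.1, hup]
    by_cases hc : pvChar s ((i₀:Nat):Int) = pvChar s ((j:Nat):Int)
    · rw [if_pos hc, hrec, if_pos ⟨hi₀, hj, hc⟩]
    · rw [if_neg hc, hrec, if_neg (by rintro ⟨-, -, h⟩; exact hc h)]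
  · rw [if_neg hin]
    apply hyp i j hi hj
    by_cases hii : i = i₀
    · right
      by_cases hjj : j = n-1
      · exact hjj
      · exfalso
        apply hin
        refine ⟨hii, ?_⟩
        rw [PySem.List.mem_pyRange_neg_one]
        omega
    · rcases hcond with h | h
      · left; omega
      · right; exact h

lemma pvOuter (s : List Char) (n : Nat) :
    ∀ (k : Nat) (c : Int) (m : List (List Int)), c + 1 ≤ (k:Int) → c ≤ (n:Int) - 2 → pvShape m n →
      (∀ i j, i < n → j < n → (c < (i:Int) ∨ j = n-1) → pvEnt m i j = pvCount s n (n+1) i j) →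
      ∀ i j, i < n → j < n →
        pvEnt ((PySem.List.pyRange c (-1) (-1)).foldl (pvRow s n) m) i j = pvCount s n (n+1) i j := by
  intro k
  induction k with
  | zero =>
    intro c m hk hc hs hyp i j hi hj
    rw [PySem.List.pyRange_neg_one_eq_nil (by omega : c ≤ -1)]
    exact hyp i j hi hj (Or.inl (by omega))
  | succ k ih =>
    intro c m hk hc hs hyp i j hi hj
    by_cases hneg : c ≤ -1
    · rw [PySem.List.pyRange_neg_one_eq_nil hneg]
      exact hyp i j hi hj (Or.inl (by omega))
    · have hc0 : 0 ≤ c := by omega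
      rw [PySem.List.pyRange_neg_one_cons (by omega : (-1:Int) < c)]
      simp only [List.foldl_cons]
      have hcnat : ((c.toNat : Nat) : Int) = c := by omega
      have hstep := pvRowStep s n c.toNat (by omega) m hs (by rw [hcnat]; exact hyp)
      have hrw : pvRow s n m c = pvRow s n m ((c.toNat : Nat) : Int) := by rw [hcnat]
      rw [hrw]
      apply ih (c-1) _ (by omega) (by omega) hstep.1
      · intro i' j' hi' hj' hcond
        apply hstep.2 i' j' hi' hj'
        rcases hcond with h | h
        · left; omega
        · right; exact h
      · exact hi
      · exact hj

lemma pvEnt_eq_getElem (m : List (List Int)) (n i j : Nat) (_hs : pvShape m n)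
    (_hi : i < n) (_hj : j < n) (hi' : i < m.length) (hj' : j < m[i].length) :
    pvEnt m i j = m[i][j] := by
  simp only [pvEnt, List.getD_eq_getElem?_getD]
  rw [List.getElem?_eq_getElem hi', Option.getD_some,
      List.getElem?_eq_getElem hj', Option.getD_some]

lemma pvShape_replicate (n : Nat) : pvShape (List.replicate n (List.replicate n (0:Int))) n := by
  constructor
  · simp
  · intro r hr
    rw [List.eq_of_mem_replicate hr]
    simp

lemma pvShape_rowfold (s : List Char) (n : Nat) :
    ∀ (L : List Int) (m : List (List Int)),
      (∀ x ∈ L, 0 ≤ x ∧ x < (n:Int)) → pvShape m n → pvShape (L.foldl (pvRow s n) m) n := by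
  intro L
  induction L with
  | nil => intro m _ hs; exact hs
  | cons x T ih =>
    intro m hL hs
    have hx := hL x (by simp)
    have hxn : x.toNat < n := by omega
    have hcast : ((x.toNat : Nat) : Int) = x := by omega
    simp only [List.foldl_cons]
    apply ih _ (fun y hy => hL y (by simp [hy]))
    have := (pvCellFold s n x.toNat hxn (PySem.List.pyRange ((n:Int)-2) (-1) (-1)) m (by
      intro y hy; rw [PySem.List.mem_pyRange_neg_one] at hy; omega) hs).1
    unfold pvRow
    rw [← hcast]
    exact this

-- the whole of A's computation produces the matrix of B's counts
lemma pvFinal (s : List Char) (n : Nat) :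
    pvShape
      ((PySem.List.pyRange ((n:Int)-2) (-1) (-1)).foldl (pvRow s n)
        ((PySem.List.pyRange 0 (n:Int) 1).foldl (pvBody2 s n)
          ((PySem.List.pyRange 0 (n:Int) 1).foldl (pvBody1 s n)
            (List.replicate n (List.replicate n (0:Int)))))) n ∧
    ∀ i j, i < n → j < n →
      pvEnt
        ((PySem.List.pyRange ((n:Int)-2) (-1) (-1)).foldl (pvRow s n)
          ((PySem.List.pyRange 0 (n:Int) 1).foldl (pvBody2 s n)
            ((PySem.List.pyRange 0 (n:Int) 1).foldl (pvBody1 s n)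
              (List.replicate n (List.replicate n (0:Int)))))) i j = pvCount s n (n+1) i j := by
  have hmem : ∀ x ∈ PySem.List.pyRange 0 (n:Int) 1, 0 ≤ x ∧ x < (n:Int) := by
    intro x hx
    rw [PySem.List.mem_pyRange_one] at hx
    omega
  obtain ⟨hs1, he1⟩ := pvLoop1 s n (PySem.List.pyRange 0 (n:Int) 1) _ hmem (pvShape_replicate n)
  obtain ⟨hs2, he2⟩ := pvLoop2 s n (PySem.List.pyRange 0 (n:Int) 1) _ hmem hs1
  -- after the two base loops, row n-1 and column n-1 hold C-values
  have h2 : ∀ i j, i < n → j < n → ((n:Int) - 2 < (i:Int) ∨ j = n-1) →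
      pvEnt ((PySem.List.pyRange 0 (n:Int) 1).foldl (pvBody2 s n)
        ((PySem.List.pyRange 0 (n:Int) 1).foldl (pvBody1 s n)
          (List.replicate n (List.replicate n (0:Int))))) i j = pvCount s n (n+1) i j := by
    intro i j hi hj hcond
    rw [he2 i j hi hj]
    by_cases hrow : i = n-1
    · rw [if_pos ⟨hrow, by rw [PySem.List.mem_pyRange_one]; omega⟩, hrow, pvC_base_row s n j hj]
    · have hcol : j = n-1 := by
        rcases hcond with h | h
        · exfalso; apply hrow; omega
        · exact h
      rw [if_neg (by rintro ⟨h, -⟩; exact hrow h)]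
      rw [he1 i j hi hj,
          if_pos ⟨by rw [PySem.List.mem_pyRange_one]; omega, hcol⟩, hcol, pvC_base_col s n i hi]
  constructor
  · exact pvShape_rowfold s n _ _ (fun x hx => by
      rw [PySem.List.mem_pyRange_neg_one] at hx; omega) hs2
  · intro i j hi hj
    exact pvOuter s n n ((n:Int)-2) _ (by omega) (by omega) hs2 h2 i j hi hj

-- ===== VERDICT (by name: the statement is the Claim_ definition above) =====
theorem checkLCP_spec : Claim_equal_checkLCP := by
  intro string lcp hdom hpre
  unfold Spec_checkLCP
  simp only [checkLCP, checkLCP_alt]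
  obtain ⟨hsh, hent⟩ := pvFinal string.toList lcp.length
  congr 1
  apply List.ext_getElem
  · simp [hsh.1]
  · intro i h1 h2
    have hi : i < lcp.length := by rw [← hsh.1]; exact h1
    apply List.ext_getElem
    · have : _ = lcp.length := hsh.2 _ (List.getElem_mem h1)
      simp [this]
    · intro j hj1 hj2
      have hj : j < lcp.length := by
        have := hsh.2 _ (List.getElem_mem h1)
        omega
      rw [← pvEnt_eq_getElem _ lcp.length i j hsh hi hj h1 hj1]
      rw [hent i j hi hj]
      simp
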